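-- pv_equiv track=rewrite | github.com/kristoforusbryant/tree_jump_proposal | proposals/naive_tree.py | set_to_dic_list
-- ===== SOURCE A (Python) =====
-- def set_to_dic_list(n, E):
--     dic = {i:[] for i in range(n)}
--     for i,j in E:
--         dic[i].append(j)
--         dic[j].append(i)
--     for i in dic.keys():
--         dic[i].sort()
--     return dic
-- ===== SOURCE B (Python) =====
-- def set_to_dic_list(n, E):
--     arcs = sorted([(i, j) for i, j in E] + [(j, i) for i, j in E])
--     dic = {i: [] for i in range(n)}
--     for s, d in arcs:
--         dic[s].append(d)
--     return dic
-- ===== Notes on version B (the rewrite author's own statement) =====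
-- stated objective: alternative
-- what changed: Instead of appending neighbors per edge into per-key buckets and then sorting each bucket, B expands E into a flat list of directed arcs, sorts that list once globally by (src,dst), and fills the pre-seeded dict in one ordered pass so every neighbor list comes out already sorted.
import Mathlib
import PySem

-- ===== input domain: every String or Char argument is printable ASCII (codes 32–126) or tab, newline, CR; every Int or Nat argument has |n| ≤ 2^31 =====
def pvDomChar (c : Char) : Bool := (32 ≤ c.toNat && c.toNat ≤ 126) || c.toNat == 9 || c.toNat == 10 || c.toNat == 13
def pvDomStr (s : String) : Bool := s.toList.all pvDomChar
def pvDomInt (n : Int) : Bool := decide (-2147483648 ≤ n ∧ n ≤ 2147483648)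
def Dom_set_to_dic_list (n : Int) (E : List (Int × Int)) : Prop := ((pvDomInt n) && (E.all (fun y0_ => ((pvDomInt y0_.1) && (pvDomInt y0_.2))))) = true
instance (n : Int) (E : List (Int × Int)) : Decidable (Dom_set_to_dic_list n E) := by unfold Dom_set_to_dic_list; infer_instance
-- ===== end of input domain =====

-- B replaces A's per-bucket sorts by one global sort of the doubled arc list
-- followed by a single in-order filling pass (objective: alternative algorithm, same cost).

-- ===== PORT A =====
-- dic = {i: [] for i in range(n)}; for i,j in E: dic[i].append(j); dic[j].append(i);
-- for i in dic.keys(): dic[i].sort(); return dic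
def set_to_dic_list (n : Int) (E : List (Int × Int)) : List (Int × List Int) :=
  let dic : PySem.Dict Int (List Int) :=
    (PySem.List.pyRange 0 n 1).foldl (fun d i => d.insert i ([] : List Int)) PySem.Dict.empty
  let dic := E.foldl (fun d p =>
    (d.modify p.1 [] (fun l => l ++ [p.2])).modify p.2 [] (fun l => l ++ [p.1])) dic
  let dic := dic.keys.foldl (fun d i => d.modify i [] (fun l => PySem.List.sorted l (fun x => x) false)) dic
  dic.items

-- ===== PORT B =====
-- arcs = sorted([(i,j) for i,j in E] + [(j,i) for i,j in E]); dic = {i: [] for i in range(n)};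
-- for s,d in arcs: dic[s].append(d); return dic
def set_to_dic_list_alt (n : Int) (E : List (Int × Int)) : List (Int × List Int) :=
  let arcs := PySem.List.sorted2 (E.map (fun p => (p.1, p.2)) ++ E.map (fun p => (p.2, p.1)))
    Prod.fst Prod.snd false
  let dic : PySem.Dict Int (List Int) :=
    (PySem.List.pyRange 0 n 1).foldl (fun d i => d.insert i ([] : List Int)) PySem.Dict.empty
  let dic := arcs.foldl (fun d a => d.modify a.1 [] (fun l => l ++ [a.2])) dic
  dic.items

-- ===== PRECONDITION & SPEC =====
-- Pre_ excludes exactly the inputs where A raises KeyError: an edge endpoint outside range(n).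
def Pre_set_to_dic_list (n : Int) (E : List (Int × Int)) : Prop :=
  ∀ p ∈ E, (0 ≤ p.1 ∧ p.1 < n) ∧ (0 ≤ p.2 ∧ p.2 < n)
instance (n : Int) (E : List (Int × Int)) : Decidable (Pre_set_to_dic_list n E) := by
  unfold Pre_set_to_dic_list; infer_instance
def pvWitness_set_to_dic_list : Int × (List (Int × Int)) := (4, [(0, 2), (3, 1), (2, 0), (2, 2)])
def Spec_set_to_dic_list (n : Int) (E : List (Int × Int)) (out : List (Int × List Int)) : Prop := out = set_to_dic_list_alt n E
instance (n : Int) (E : List (Int × Int)) (out : List (Int × List Int)) : Decidable (Spec_set_to_dic_list n E out) := by unfold Spec_set_to_dic_list; infer_instance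

-- ===== CLAIM (what is proved, stated in full; the proofs are below) =====
def Claim_equal_set_to_dic_list : Prop := ∀ (n : Int) (E : List (Int × Int)), Dom_set_to_dic_list n E → Pre_set_to_dic_list n E → Spec_set_to_dic_list n E (set_to_dic_list n E)

-- ===== LEMMAS AND PROOFS =====

-- The doubled arc lists of A (interleaved) and B (appended) are permutations of each other.
theorem arcs_perm (E : List (Int × Int)) :
    (E.flatMap (fun p => [(p.1, p.2), (p.2, p.1)])).Perm
      (E.map (fun p => (p.1, p.2)) ++ E.map (fun p => (p.2, p.1))) := by
  induction E with
  | nil => simp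
  | cons p E ih =>
    simp only [List.flatMap_cons, List.map_cons, List.cons_append]
    exact List.Perm.cons _ ((List.Perm.cons _ ih).trans List.perm_middle.symm)

-- A's edge loop is the fold of single modifies over the interleaved arc list.
theorem a_fold_eq_arcs_fold (E : List (Int × Int)) (d : PySem.Dict Int (List Int)) :
    E.foldl (fun d p =>
      (d.modify p.1 [] (fun l => l ++ [p.2])).modify p.2 [] (fun l => l ++ [p.1])) d
    = (E.flatMap (fun p => [(p.1, p.2), (p.2, p.1)])).foldl
        (fun d a => d.modify a.1 [] (fun l => l ++ [a.2])) d := by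
  induction E generalizing d with
  | nil => rfl
  | cons p E ih => simpa using ih _

-- B's sort is A's sort under the lexicographic linear order on Int × Int.
theorem sorted2_eq_sorted_lex (xs : List (Int × Int)) :
    PySem.List.sorted2 xs Prod.fst Prod.snd false
      = PySem.List.sorted xs (fun p => (toLex p : Int ×ₗ Int)) false := by
  show xs.foldl (fun acc x => PySem.List.insertBy
      (fun a b : Int × Int => decide (a.1 < b.1) || (!decide (b.1 < a.1) && decide (a.2 < b.2))) x acc) []
    = xs.foldl (fun acc x => PySem.List.insertBy
      (fun a b : Int × Int => decide ((toLex a : Int ×ₗ Int) < toLex b)) x acc) []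
  congr 1
  funext acc x
  congr 1
  funext a b
  have : (toLex a : Int ×ₗ Int) < toLex b ↔ a.1 < b.1 ∨ a.1 = b.1 ∧ a.2 < b.2 :=
    Prod.Lex.lt_iff
  by_cases h1 : a.1 < b.1 <;> by_cases h2 : b.1 < a.1 <;> by_cases h3 : a.2 < b.2 <;>
    simp [h1, h2, h3, this] <;> omega

-- A dict fold of modifies at already-present keys keeps the key list.
theorem keys_foldl_modify_mem {β : Type} (L : List β) (key : β → Int)
    (f : β → List Int → List Int) (d : PySem.Dict Int (List Int))
    (h : ∀ a ∈ L, key a ∈ d.keys) :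
    (L.foldl (fun d a => d.modify (key a) [] (f a)) d).keys = d.keys := by
  induction L generalizing d with
  | nil => rfl
  | cons a L ih =>
    have hk : (d.modify (key a) [] (f a)).keys = d.keys := by
      rw [PySem.Dict.keys_modify, PySem.Dict.keys_insert_of_contains]
      exact (PySem.Dict.contains_iff_mem_keys _ _).mpr (h a (by simp))
    rw [List.foldl_cons, ih _ (by intro b hb; rw [hk]; exact h b (by simp [hb])), hk]

-- The initial dict {i: [] for i in range(n)}: items, keys, lookups.
theorem init_items (n : Int) :
    ((PySem.List.pyRange 0 n 1).foldl (fun d i => d.insert i ([] : List Int))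
      PySem.Dict.empty).items
    = (PySem.List.pyRange 0 n 1).map (fun i => (i, ([] : List Int))) := by
  have := PySem.Dict.items_foldl_insert_fresh (PySem.List.pyRange 0 n 1)
    (fun i => i) (fun _ => ([] : List Int)) PySem.Dict.empty
    (by intro a _; rfl) (by simpa using PySem.List.nodup_pyRange_one 0 n)
  simpa using this

theorem init_keys (n : Int) :
    ((PySem.List.pyRange 0 n 1).foldl (fun d i => d.insert i ([] : List Int))
      PySem.Dict.empty).keys
    = PySem.List.pyRange 0 n 1 := by
  simp only [PySem.Dict.keys]
  rw [init_items]
  have h : ((fun x : Int × List Int => x.1) ∘ fun i : Int => (i, ([] : List Int))) = id := rfl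
  rw [List.map_map, h, List.map_id]

theorem init_getD (n : Int) (k : Int) (hk : k ∈ PySem.List.pyRange 0 n 1) :
    ((PySem.List.pyRange 0 n 1).foldl (fun d i => d.insert i ([] : List Int))
      PySem.Dict.empty).getD k [] = [] := by
  apply PySem.Dict.getD_of_mem_items
  · rw [init_items]; exact List.mem_map.mpr ⟨k, hk, rfl⟩
  · rw [init_keys]; exact PySem.List.nodup_pyRange_one 0 n

-- The per-key sorting pass: lookup after folding `modify _ sort` over a nodup key list.
theorem getD_sort_fold (K : List Int) (hK : K.Nodup) (d : PySem.Dict Int (List Int)) (k : Int) :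
    (K.foldl (fun d i => d.modify i [] (fun l => PySem.List.sorted l (fun x => x) false)) d).getD k []
    = if k ∈ K then PySem.List.sorted (d.getD k []) (fun x => x) false else d.getD k [] := by
  induction K generalizing d with
  | nil => simp
  | cons i K ih =>
    rw [List.foldl_cons, ih (by exact hK.of_cons)]
    by_cases hik : k = i
    · subst hik
      have hkK : k ∉ K := by simpa using (List.nodup_cons.mp hK).1
      simp [hkK]
    · simp [hik, PySem.Dict.getD_modify]

-- Selecting the arcs with source k from the lex-sorted arc list yields
-- destinations in nondecreasing order.
theorem pairwise_filter_sorted (xs : List (Int × Int)) (k : Int) :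
    ((( PySem.List.sorted xs (fun p => (toLex p : Int ×ₗ Int)) false).filter
        (fun a => a.1 == k)).map Prod.snd).Pairwise (· ≤ ·) := by
  rw [List.pairwise_map]
  have hs := PySem.List.sorted_pairwise xs (fun p => (toLex p : Int ×ₗ Int))
  refine List.Pairwise.imp_of_mem ?_ (List.Pairwise.sublist List.filter_sublist hs)
  intro a b ha hb hle
  have ha1 : a.1 = k := by simpa using (List.of_mem_filter ha)
  have hb1 : b.1 = k := by simpa using (List.of_mem_filter hb)
  rcases Prod.Lex.le_iff.mp hle with h | ⟨_, h2⟩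
  · exact absurd h (by simp [ha1, hb1])
  · exact h2

-- The heart of the equivalence: per key, A's "collect then sort" equals
-- B's "filter the globally sorted arc list".
theorem sorted_collect_eq_filter_sorted (E : List (Int × Int)) (k : Int) :
    PySem.List.sorted
      (((E.flatMap (fun p => [(p.1, p.2), (p.2, p.1)])).filter (fun a => a.1 == k)).map Prod.snd)
      (fun x => x) false
    = (((PySem.List.sorted2 (E.map (fun p => (p.1, p.2)) ++ E.map (fun p => (p.2, p.1)))
          Prod.fst Prod.snd false).filter (fun a => a.1 == k)).map Prod.snd) := by
  rw [sorted2_eq_sorted_lex]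
  refine PySem.List.sorted_id_eq_of_perm_of_pairwise _ _ ?_ (pairwise_filter_sorted _ k)
  refine List.Perm.map _ (List.Perm.filter _ ?_)
  exact (PySem.List.sorted_perm _ _ _).trans (arcs_perm E).symm

theorem set_to_dic_list_spec : Claim_equal_set_to_dic_list := by
  intro n E _ hpre
  show set_to_dic_list n E = set_to_dic_list_alt n E
  unfold set_to_dic_list set_to_dic_list_alt
  dsimp only
  have hR := PySem.List.nodup_pyRange_one 0 n
  set R := PySem.List.pyRange 0 n 1 with hRdef
  set d0 : PySem.Dict Int (List Int) :=
    R.foldl (fun d i => d.insert i ([] : List Int)) PySem.Dict.empty with hd0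
  have hmem : ∀ p ∈ E, p.1 ∈ R ∧ p.2 ∈ R := by
    intro p hp
    rcases hpre p hp with ⟨h1, h2⟩
    constructor <;> rw [hRdef, PySem.List.mem_pyRange_one] <;> omega
  -- A's edge loop as a fold over the interleaved arc list
  rw [a_fold_eq_arcs_fold]
  set arcsA := E.flatMap (fun p => [(p.1, p.2), (p.2, p.1)]) with harcsA
  set dA := arcsA.foldl (fun d a => d.modify a.1 [] (fun l => l ++ [a.2])) d0 with hdA
  have harcsAmem : ∀ a ∈ arcsA, a.1 ∈ R := by
    intro a ha
    rw [harcsA, List.mem_flatMap] at ha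
    rcases ha with ⟨p, hp, ha⟩
    rcases hmem p hp with ⟨h1, h2⟩
    simp only [List.mem_cons] at ha
    rcases ha with rfl | rfl | h
    · exact h1
    · exact h2
    · cases h
  have hkeysA : dA.keys = R := by
    rw [hdA]
    rw [keys_foldl_modify_mem arcsA Prod.fst (fun a l => l ++ [a.2]) d0
      (by intro a ha; rw [init_keys]; exact harcsAmem a ha)]
    exact init_keys n
  -- B's arcs and dict
  set arcsS := PySem.List.sorted2 (E.map (fun p => (p.1, p.2)) ++ E.map (fun p => (p.2, p.1)))
    Prod.fst Prod.snd false with harcsS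
  set dB := arcsS.foldl (fun d a => d.modify a.1 [] (fun l => l ++ [a.2])) d0 with hdB
  have harcsSmem : ∀ a ∈ arcsS, a.1 ∈ R := by
    intro a ha
    have : a ∈ E.map (fun p => (p.1, p.2)) ++ E.map (fun p => (p.2, p.1)) :=
      (PySem.List.sorted2_perm _ _ _ _).mem_iff.mp ha
    rw [List.mem_append, List.mem_map, List.mem_map] at this
    rcases this with ⟨p, hp, rfl⟩ | ⟨p, hp, rfl⟩
    · exact (hmem p hp).1
    · exact (hmem p hp).2
  have hkeysB : dB.keys = R := by
    rw [hdB]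
    rw [keys_foldl_modify_mem arcsS Prod.fst (fun a l => l ++ [a.2]) d0
      (by intro a ha; rw [init_keys]; exact harcsSmem a ha)]
    exact init_keys n
  -- items of both sides via keys + getD
  rw [PySem.Dict.items_eq_map_keys _ (by
        rw [keys_foldl_modify_mem _ (fun i : Int => i)
          (fun i l => PySem.List.sorted l (fun x => x) false) dA (by intro a ha; exact ha),
          hkeysA]; exact hR) ([] : List Int),
      PySem.Dict.items_eq_map_keys dB (by rw [hkeysB]; exact hR) ([] : List Int)]
  rw [keys_foldl_modify_mem _ (fun i : Int => i)
        (fun i l => PySem.List.sorted l (fun x => x) false) dA (by intro a ha; exact ha),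
      hkeysA, hkeysB]
  apply List.map_congr_left
  intro k hk
  refine congrArg (fun v => (k, v)) ?_
  have hsort := getD_sort_fold dA.keys (by rw [hkeysA]; exact hR) dA k
  rw [hkeysA] at hsort
  rw [hsort, if_pos hk]
  rw [hdA, hdB, PySem.Dict.getD_foldl_modify_append, PySem.Dict.getD_foldl_modify_append,
    init_getD n k hk]
  rw [harcsA, harcsS]
  exact sorted_collect_eq_filter_sorted E k
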